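-- pv_equiv track=rewrite | github.com/ashioyajotham/Coding-Challenges-Interviews | Spring 2019/visa.py | maxInversions
-- ===== SOURCE A (Python) =====
-- def maxInversions(prices):
--     count = 0
--
--     for i in range(len(prices)):
--         numLessThan = 0
--         numGreaterThan = 0
--
--         for j in range(i+1, len(prices)):
--             if prices[j] < prices[i]:
--                 numLessThan += 1
--
--         for j in range (0, i):
--             if prices[j] > prices[i]:
--                 numGreaterThan += 1
--
--         count += numGreaterThan * numLessThan
--
--     return count
-- ===== SOURCE B (Python) =====
-- def maxInversions(prices):
--     # one forward pass: seen[j] = (value, # strictly greater elements before it);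
--     # each new element closes every descending pair above it into a triple
--     count = 0
--     seen = []
--     for x in prices:
--         g = 0
--         for v, d in seen:
--             if v > x:
--                 g += 1
--                 count += d
--         seen.append((x, g))
--     return count
-- ===== Notes on version B (the rewrite author's own statement) =====
-- stated objective: alternative
-- what changed: Replaced A's per-middle-index pair of directional scans (greater-before x smaller-after) with a single forward pass that annotates each seen element with its greater-before count and counts each descending triple when its last element arrives.
import Mathlib
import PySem

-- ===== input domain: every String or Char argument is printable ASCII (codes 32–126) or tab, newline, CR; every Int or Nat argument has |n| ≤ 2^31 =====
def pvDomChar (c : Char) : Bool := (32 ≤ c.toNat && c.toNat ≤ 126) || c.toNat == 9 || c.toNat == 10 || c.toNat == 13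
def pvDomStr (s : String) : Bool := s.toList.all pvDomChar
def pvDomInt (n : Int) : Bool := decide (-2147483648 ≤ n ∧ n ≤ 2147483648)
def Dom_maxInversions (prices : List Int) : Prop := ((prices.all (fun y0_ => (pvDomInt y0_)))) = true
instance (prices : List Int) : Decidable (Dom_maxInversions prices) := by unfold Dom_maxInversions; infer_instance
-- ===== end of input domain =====

-- B replaces A's two directional scans per middle index by one forward pass that counts
-- each descending triple at its last element (alternative decomposition, fewer comparisons).

-- ===== PORT A =====
-- literal port: outer loop over range(len), two inner index loops counting comparisons
def maxInversions (prices : List Int) : Int :=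
  (PySem.List.pyRange 0 prices.length 1).foldl (fun count i =>
    let numLessThan :=
      (PySem.List.pyRange (i + 1) prices.length 1).foldl (fun c j =>
        if PySem.List.pyGetD prices j 0 < PySem.List.pyGetD prices i 0 then c + 1 else c) (0 : Int)
    let numGreaterThan :=
      (PySem.List.pyRange 0 i 1).foldl (fun c j =>
        if PySem.List.pyGetD prices i 0 < PySem.List.pyGetD prices j 0 then c + 1 else c) (0 : Int)
    count + numGreaterThan * numLessThan) 0

-- ===== PORT B =====
-- literal port of Source B: state = (count, seen); inner loop over seen updates (g, count)
def maxInversions_alt (prices : List Int) : Int :=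
  (prices.foldl (fun (st : Int × List (Int × Int)) x =>
    let r := st.2.foldl (fun (p : Int × Int) vd =>
      if x < vd.1 then (p.1 + 1, p.2 + vd.2) else p) ((0 : Int), (0 : Int))
    (st.1 + r.2, st.2 ++ [(x, r.1)])) ((0 : Int), ([] : List (Int × Int)))).1

-- ===== PRECONDITION & SPEC =====
def Spec_maxInversions (prices : List Int) (out : Int) : Prop := out = maxInversions_alt prices
instance (prices : List Int) (out : Int) : Decidable (Spec_maxInversions prices out) := by unfold Spec_maxInversions; infer_instance

-- ===== CLAIM (what is proved, stated in full; the proofs are below) =====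
def Claim_equal_maxInversions : Prop := ∀ (prices : List Int), Dom_maxInversions prices → Spec_maxInversions prices (maxInversions prices)

-- ===== LEMMAS AND PROOFS =====

-- structural form of A: walk forward, at each middle element multiply greater-in-prefix by smaller-in-suffix
def F2 : List Int → List Int → Int
  | _, [] => 0
  | pre, x :: suf =>
      (pre.countP (fun v => decide (x < v)) : Int) * (suf.countP (fun v => decide (v < x)) : Int)
        + F2 (pre ++ [x]) suf

-- helpers on annotated seen-lists (value, greater-before count)
def cntGt (s : List (Int × Int)) (x : Int) : Int := (s.countP (fun vd => decide (x < vd.1)) : Int)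
def sumGt (s : List (Int × Int)) (x : Int) : Int :=
  ((s.filter (fun vd => decide (x < vd.1))).map (·.2)).sum

-- structural form of B
def HB : List (Int × Int) → List Int → Int
  | _, [] => 0
  | s, x :: rest => sumGt s x + HB (s ++ [(x, cntGt s x)]) rest

def annB : List (Int × Int) → List Int → List (Int × Int)
  | _, [] => []
  | s, x :: rest => (x, cntGt s x) :: annB (s ++ [(x, cntGt s x)]) rest

-- B-count on an annotated list, regrouped by middle element
def Fann : List (Int × Int) → Int
  | [] => 0
  | (v, g) :: rest => g * (rest.countP (fun vd => decide (vd.1 < v)) : Int) + Fann rest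

theorem map_fst_annB (l : List Int) : ∀ s, (annB s l).map (·.1) = l := by
  induction l with
  | nil => intro s; simp [annB]
  | cons x rest ih => intro s; simp only [annB, List.map_cons, ih]

theorem countP_annB_fst (l : List Int) (s : List (Int × Int)) (p : Int → Bool) :
    (annB s l).countP (fun vd => p vd.1) = l.countP p := by
  have h := List.countP_map (p := p) (f := (·.1 : Int × Int → Int)) (l := annB s l)
  rw [map_fst_annB l s] at h
  simpa [Function.comp_def] using h.symm

theorem sumGt_append (s : List (Int × Int)) (x g u : Int) :
    sumGt (s ++ [(x, g)]) u = sumGt s u + (if u < x then g else 0) := by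
  simp [sumGt, List.filter_append]
  split_ifs <;> simp_all

theorem cntGt_eq (s : List (Int × Int)) (x : Int) :
    cntGt s x = ((s.map (·.1)).countP (fun v => decide (x < v)) : Int) := by
  simp [cntGt, List.countP_map, Function.comp_def]

theorem sum_map_if_const (rest : List Int) (x g : Int) :
    (rest.map (fun u => if u < x then g else 0)).sum
      = g * (rest.countP (fun u => decide (u < x)) : Int) := by
  induction rest with
  | nil => simp
  | cons u t ih =>
      by_cases h : u < x
      · simp [h, ih]; ring
      · simp [h, ih]

-- B's structural form equals the middle-grouped count plus the cross terms with seen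
theorem HB_eq_Fann (l : List Int) : ∀ s,
    HB s l = Fann (annB s l) + (l.map (fun u => sumGt s u)).sum := by
  induction l with
  | nil => intro s; simp [HB, annB, Fann]
  | cons x rest ih =>
      intro s
      have hcnt : ((annB (s ++ [(x, cntGt s x)]) rest).countP (fun vd => decide (vd.1 < x)) : Int)
          = (rest.countP (fun u => decide (u < x)) : Int) := by
        exact congrArg (fun n : Nat => (n : Int)) (countP_annB_fst rest _ (fun u => decide (u < x)))
      have hsg : (rest.map (fun u => sumGt (s ++ [(x, cntGt s x)]) u)).sum
          = (rest.map (fun u => sumGt s u)).sum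
            + cntGt s x * (rest.countP (fun u => decide (u < x)) : Int) := by
      -- pointwise split of sumGt over the appended annotation, then sum the constant-if part
        have h1 : (rest.map (fun u => sumGt (s ++ [(x, cntGt s x)]) u))
            = (rest.map (fun u => sumGt s u + (if u < x then cntGt s x else 0))) := by
          simp [sumGt_append]
        rw [h1, PySem.List.sum_map_add_int rest (fun u => sumGt s u)
              (fun u => if u < x then cntGt s x else 0), sum_map_if_const rest x (cntGt s x)]
      simp only [HB, annB, Fann, List.map_cons, List.sum_cons, ih, hcnt, hsg]
      ring

theorem sumGt_nil (x : Int) : sumGt [] x = 0 := rfl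

-- B's fold invariant: running the loop from (c, s) adds HB s l and appends the annotations
theorem altFold (l : List Int) : ∀ (c : Int) (s : List (Int × Int)),
    l.foldl (fun (st : Int × List (Int × Int)) x =>
      let r := st.2.foldl (fun (p : Int × Int) vd =>
        if x < vd.1 then (p.1 + 1, p.2 + vd.2) else p) ((0 : Int), (0 : Int))
      (st.1 + r.2, st.2 ++ [(x, r.1)])) (c, s)
    = (c + HB s l, s ++ annB s l) := by
  induction l with
  | nil => intro c s; simp [HB, annB]
  | cons x rest ih =>
      intro c s
      have inner : ∀ (s' : List (Int × Int)) (a b : Int),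
          s'.foldl (fun (p : Int × Int) vd =>
            if x < vd.1 then (p.1 + 1, p.2 + vd.2) else p) (a, b)
          = (a + cntGt s' x, b + sumGt s' x) := by
        intro s'
        induction s' with
        | nil => intro a b; simp [cntGt, sumGt]
        | cons vd t iht =>
            intro a b
            by_cases h : x < vd.1
            · simp only [List.foldl_cons, if_pos h, iht]
              simp only [cntGt, sumGt, List.countP_cons, List.filter_cons, h, decide_true,
                if_true, List.map_cons, List.sum_cons, Prod.mk.injEq]
              constructor
              · push_cast; ring
              · ring
            · simp only [List.foldl_cons, if_neg h, iht]
              simp [cntGt, sumGt, h]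
      simp only [List.foldl_cons, inner s 0 0, zero_add, ih, HB, annB, Prod.mk.injEq]
      constructor
      · ring_nf
      · simp

-- the index loop 'for j in range(0, i)' reads exactly the first i elements
theorem map_pyGetD_range_take (l : List Int) (i : Nat) (hi : i ≤ l.length) :
    (PySem.List.pyRange 0 (i : Int) 1).map (fun j => PySem.List.pyGetD l j 0) = l.take i := by
  apply List.ext_getElem
  · simp [PySem.List.length_pyRange_one, hi]
  · intro k h1 h2
    have hk2 : k < (PySem.List.pyRange 0 (i : Int) 1).length := by simpa using h1
    have hk : k < i := by
      simpa [PySem.List.length_pyRange_one] using hk2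
    have hg : (PySem.List.pyRange 0 (i : Int) 1)[k]'hk2 = ((k : Int)) := by
      rw [PySem.List.getElem_pyRange_one]; ring
    simp only [List.getElem_map, hg]
    rw [PySem.List.pyGetD_natCast]
    have hkl : k < l.length := lt_of_lt_of_le hk hi
    simp [hkl]

-- A's value as a sum over middle indices of (greater before) * (smaller after)
theorem A_as_sum (l : List Int) :
    maxInversions l = ((List.range l.length).map (fun i =>
      ((l.take i).countP (fun v => decide (l.getD i 0 < v)) : Int)
        * ((l.drop (i + 1)).countP (fun v => decide (v < l.getD i 0)) : Int))).sum := by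
  unfold maxInversions
  rw [PySem.List.foldl_add (g := fun i =>
    (let numLessThan :=
      (PySem.List.pyRange (i + 1) l.length 1).foldl (fun c j =>
        if PySem.List.pyGetD l j 0 < PySem.List.pyGetD l i 0 then c + 1 else c) (0 : Int)
     let numGreaterThan :=
      (PySem.List.pyRange 0 i 1).foldl (fun c j =>
        if PySem.List.pyGetD l i 0 < PySem.List.pyGetD l j 0 then c + 1 else c) (0 : Int)
     numGreaterThan * numLessThan))]
  rw [zero_add, PySem.List.pyRange_zero_nat, List.map_map]
  congr 1
  apply List.map_congr_left
  intro i hi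
  have hil : i < l.length := List.mem_range.mp hi
  have hget : PySem.List.pyGetD l (i : Int) 0 = l.getD i 0 := by
    rw [PySem.List.pyGetD_natCast]
  simp only [Function.comp_def]
  have hless :
      (PySem.List.pyRange ((i : Int) + 1) (l.length : Int) 1).foldl (fun c j =>
        if PySem.List.pyGetD l j 0 < PySem.List.pyGetD l (i : Int) 0 then c + 1 else c) (0 : Int)
      = ((l.drop (i + 1)).countP (fun v => decide (v < l.getD i 0)) : Int) := by
    have h0 : (0 : Int) ≤ (i : Int) + 1 := by positivity
    have hfold := PySem.List.foldl_pyRange_pyGetD (xs := l) (d := 0)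
      (f := fun (c : Int) (v : Int) => if v < PySem.List.pyGetD l (i : Int) 0 then c + 1 else c)
      (init := (0 : Int)) (a := (i : Int) + 1) h0
    simp only [PySem.List.len_eq] at hfold
    rw [hfold]
    rw [PySem.List.foldl_ite_add_one (p := fun v => v < PySem.List.pyGetD l (i : Int) 0)]
    rw [zero_add, hget]
    norm_num
  have hmore :
      (PySem.List.pyRange 0 (i : Int) 1).foldl (fun c j =>
        if PySem.List.pyGetD l (i : Int) 0 < PySem.List.pyGetD l j 0 then c + 1 else c) (0 : Int)
      = ((l.take i).countP (fun v => decide (l.getD i 0 < v)) : Int) := by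
    have h2 : (PySem.List.pyRange 0 (i : Int) 1).foldl (fun c j =>
          if PySem.List.pyGetD l (i : Int) 0 < PySem.List.pyGetD l j 0 then c + 1 else c) (0 : Int)
        = (l.take i).foldl (fun c v =>
          if PySem.List.pyGetD l (i : Int) 0 < v then c + 1 else c) (0 : Int) := by
      rw [← map_pyGetD_range_take l i (le_of_lt hil), List.foldl_map]
    rw [h2, PySem.List.foldl_ite_add_one (p := fun v => PySem.List.pyGetD l (i : Int) 0 < v)]
    rw [zero_add, hget]
  simp only [hless, hmore]

-- F2 matches the index sum
theorem F2_eq_sum (l : List Int) : ∀ (suf pre : List Int), pre ++ suf = l →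
    F2 pre suf = ((List.range' pre.length suf.length).map (fun i =>
      ((l.take i).countP (fun v => decide (l.getD i 0 < v)) : Int)
        * ((l.drop (i + 1)).countP (fun v => decide (v < l.getD i 0)) : Int))).sum := by
  intro suf
  induction suf with
  | nil => intro pre h; simp [F2]
  | cons x rest ih =>
      intro pre h
      have hget : l.getD pre.length 0 = x := by
        rw [← h]; simp [List.getD_eq_getElem?_getD]
      have htake : l.take pre.length = pre := by rw [← h]; simp
      have hdrop : l.drop (pre.length + 1) = rest := by
        rw [← h, show pre ++ x :: rest = (pre ++ [x]) ++ rest by simp,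
            show pre.length + 1 = (pre ++ [x]).length by simp, List.drop_left]
      rw [show (x :: rest).length = rest.length + 1 from rfl, List.range'_succ,
          List.map_cons, List.sum_cons]
      rw [show F2 pre (x :: rest)
            = (pre.countP (fun v => decide (x < v)) : Int)
                * (rest.countP (fun v => decide (v < x)) : Int) + F2 (pre ++ [x]) rest from rfl]
      rw [ih (pre ++ [x]) (by simp [h])]
      have hget2 : l[pre.length]?.getD 0 = x := by rw [← h]; simp
      simp [hget2, htake, hdrop]

-- Fann of the annotated walk is exactly A's structural form
theorem Fann_annB (suf : List Int) : ∀ (s : List (Int × Int)) (pre : List Int),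
    s.map (·.1) = pre → Fann (annB s suf) = F2 pre suf := by
  induction suf with
  | nil => intro s pre h; simp [annB, F2, Fann]
  | cons x rest ih =>
      intro s pre h
      have hcnt : ((annB (s ++ [(x, cntGt s x)]) rest).countP (fun vd => decide (vd.1 < x)) : Int)
          = (rest.countP (fun v => decide (v < x)) : Int) := by
        exact congrArg (fun n : Nat => (n : Int)) (countP_annB_fst rest _ (fun u => decide (u < x)))
      simp only [annB, Fann, F2]
      rw [hcnt, ih (s ++ [(x, cntGt s x)]) (pre ++ [x]) (by simp [h]), cntGt_eq, h]

-- ===== VERDICT (by name: the statement is the Claim_ definition above) =====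
theorem maxInversions_spec : Claim_equal_maxInversions := by
  intro l _
  unfold Spec_maxInversions
  unfold maxInversions_alt
  rw [altFold l 0 []]
  simp only
  rw [zero_add, HB_eq_Fann]
  simp only [sumGt_nil]
  rw [Fann_annB l [] [] rfl]
  rw [A_as_sum l, F2_eq_sum l l [] rfl]
  simp [List.range'_eq_map_range]
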